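-- pv_equiv track=rewrite | github.com/ntr17/strenght-coach-agent | src/prompt.py | _format_coach_state
-- ===== SOURCE A (Python) =====
-- def _format_coach_state(coach_state: dict) -> str:
--     """
--     Format the Coach State tab as a compact briefing.
--     This is the coach's own compressed knowledge — one line per domain.
--     Ordered so the most actionable domains appear first.
--     """
--     if not coach_state:
--         return ""
--     domain_order = ["PROGRAM", "SQUAT", "BENCH", "DEADLIFT", "OHP", "HEALTH", "SCHEDULE",
--                     "LIFESTYLE", "GOALS"]
--     lines = []
--     seen = set()
--     for domain in domain_order:
--         if domain in coach_state:
--             entry = coach_state[domain]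
--             summary = entry.get("summary", "").strip()
--             confidence = entry.get("confidence", "")
--             updated = entry.get("last_updated", "")
--             if summary:
--                 suffix = f" [{confidence}, {updated}]" if confidence and updated else ""
--                 lines.append(f"  {domain}: {summary}{suffix}")
--                 seen.add(domain)
--     # Any remaining domains not in the ordered list
--     for domain, entry in coach_state.items():
--         if domain not in seen:
--             summary = entry.get("summary", "").strip()
--             if summary:
--                 lines.append(f"  {domain}: {summary}")
--     return "\n".join(lines)
-- ===== SOURCE B (Python) =====
-- def _format_coach_state(coach_state: dict) -> str:
--     domain_order = ["PROGRAM", "SQUAT", "BENCH", "DEADLIFT", "OHP", "HEALTH", "SCHEDULE",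
--                     "LIFESTYLE", "GOALS"]
--     rank = {d: i for i, d in enumerate(domain_order)}
--     n = len(domain_order)
--     buckets = [[] for _ in range(n + 1)]
--     for domain, entry in coach_state.items():
--         summary = entry.get("summary", "").strip()
--         if not summary:
--             continue
--         r = rank.get(domain, n)
--         confidence = entry.get("confidence", "")
--         updated = entry.get("last_updated", "")
--         if r < n and confidence and updated:
--             buckets[r].append(f"  {domain}: {summary} [{confidence}, {updated}]")
--         else:
--             buckets[r].append(f"  {domain}: {summary}")
--     return "\n".join(line for bucket in buckets for line in bucket)
-- ===== Notes on version B (the rewrite author's own statement) =====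
-- stated objective: alternative
-- what changed: A makes an ordered pass of membership probes into the dict plus a second sweep over all items filtered by a 'seen' set; B makes a single pass over the items, bucketing each formatted line by the domain's rank (index in domain_order, or 9 for unknown domains), then flattens the buckets.
import Mathlib
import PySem

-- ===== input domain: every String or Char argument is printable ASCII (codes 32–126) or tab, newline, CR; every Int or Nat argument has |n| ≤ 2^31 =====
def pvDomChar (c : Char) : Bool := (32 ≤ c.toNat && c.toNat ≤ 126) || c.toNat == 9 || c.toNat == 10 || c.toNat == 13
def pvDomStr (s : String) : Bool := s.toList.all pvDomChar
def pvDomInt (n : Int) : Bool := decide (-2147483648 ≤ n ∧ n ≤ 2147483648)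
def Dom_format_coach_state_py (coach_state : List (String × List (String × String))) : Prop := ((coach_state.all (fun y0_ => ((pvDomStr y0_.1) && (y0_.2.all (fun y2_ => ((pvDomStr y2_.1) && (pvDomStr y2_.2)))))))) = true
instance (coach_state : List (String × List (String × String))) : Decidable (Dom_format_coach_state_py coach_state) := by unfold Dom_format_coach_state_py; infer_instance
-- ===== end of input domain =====

-- B replaces A's two passes (ordered membership probes + a 'seen' set sweep) by a single
-- bucket pass over the dict items keyed by each domain's rank; same return value (alternative decomposition).

-- the literal domain_order list both Pythons contain
def pvOrderNames : List String :=
  ["PROGRAM", "SQUAT", "BENCH", "DEADLIFT", "OHP", "HEALTH", "SCHEDULE", "LIFESTYLE", "GOALS"]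

-- entry.get(key, "") on the Python dict built from the association list (duplicate keys: last value wins)
def pvEntryGetD (e : List (String × String)) (k : String) : String :=
  (PySem.Dict.ofList e).getD k ""

-- ===== PORT A =====

-- body of A's first loop: 'if domain in coach_state: … if summary: lines.append(…); seen.add(domain)'
def pvStepA1 (cs : PySem.Dict String (List (String × String)))
    (st : List String × PySem.Set String) (domain : String) :
    List String × PySem.Set String :=
  match cs.get? domain with          -- none ⟺ 'domain in coach_state' is False
  | none => st
  | some entry =>
    let summary := PySem.Str.strip (pvEntryGetD entry "summary")
    let confidence := pvEntryGetD entry "confidence"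
    let updated := pvEntryGetD entry "last_updated"
    if summary ≠ "" then
      let suffix := if confidence ≠ "" ∧ updated ≠ "" then " [" ++ confidence ++ ", " ++ updated ++ "]" else ""
      (st.1 ++ ["  " ++ domain ++ ": " ++ summary ++ suffix], st.2.add domain)
    else st

-- body of A's second loop: 'if domain not in seen: … if summary: lines.append(…)'
def pvStepA2 (seen : PySem.Set String)
    (ls : List String) (p : String × List (String × String)) : List String :=
  if p.1 ∈ seen then ls
  else
    let summary := PySem.Str.strip (pvEntryGetD p.2 "summary")
    if summary ≠ "" then ls ++ ["  " ++ p.1 ++ ": " ++ summary] else ls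

def format_coach_state_py (coach_state : List (String × List (String × String))) : String :=
  let cs := PySem.Dict.ofList coach_state
  if cs.items.isEmpty then ""        -- 'if not coach_state: return ""'
  else
    let st := pvOrderNames.foldl (pvStepA1 cs) ([], PySem.Set.ofList [])
    let lines := cs.items.foldl (pvStepA2 st.2) st.1
    PySem.Str.join "\n" lines

-- ===== PORT B =====

-- body of B's single loop: bucket the formatted line under the domain's rank
-- (rank values are always in 0..n, n = 9, so Nat is exact for Python's nonnegative ints here)
def pvStepB (rank : PySem.Dict String Nat) (n : Nat)
    (bs : List (List String)) (p : String × List (String × String)) : List (List String) :=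
  let summary := PySem.Str.strip (pvEntryGetD p.2 "summary")
  if summary = "" then bs            -- 'continue'
  else
    let r := rank.getD p.1 n         -- 'rank.get(domain, n)'
    let confidence := pvEntryGetD p.2 "confidence"
    let updated := pvEntryGetD p.2 "last_updated"
    let line :=
      if r < n ∧ confidence ≠ "" ∧ updated ≠ "" then
        "  " ++ p.1 ++ ": " ++ summary ++ " [" ++ confidence ++ ", " ++ updated ++ "]"
      else
        "  " ++ p.1 ++ ": " ++ summary
    bs.set r (bs.getD r [] ++ [line])  -- 'buckets[r].append(line)'

def format_coach_state_py_alt (coach_state : List (String × List (String × String))) : String :=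
  let rank : PySem.Dict String Nat := PySem.Dict.ofList pvOrderNames.zipIdx  -- {d: i for i, d in enumerate(domain_order)}
  let n := pvOrderNames.length
  let buckets := (PySem.Dict.ofList coach_state).items.foldl (pvStepB rank n) (List.replicate (n + 1) [])
  PySem.Str.join "\n" buckets.flatten

-- ===== PRECONDITION & SPEC =====
def Spec_format_coach_state_py (coach_state : List (String × List (String × String))) (out : String) : Prop := out = format_coach_state_py_alt coach_state
instance (coach_state : List (String × List (String × String))) (out : String) : Decidable (Spec_format_coach_state_py coach_state out) := by unfold Spec_format_coach_state_py; infer_instance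

-- ===== CLAIM (what is proved, stated in full; the proofs are below) =====
def Claim_equal_format_coach_state_py : Prop := ∀ (coach_state : List (String × List (String × String))), Dom_format_coach_state_py coach_state → Spec_format_coach_state_py coach_state (format_coach_state_py coach_state)

-- ===== LEMMAS AND PROOFS =====

-- proof-side abbreviations
def pvSum (e : List (String × String)) : String := PySem.Str.strip (pvEntryGetD e "summary")

def pvRank (x : String) : Nat :=
  (PySem.Dict.ofList pvOrderNames.zipIdx).getD x pvOrderNames.length

-- the line B emits for item p
def pvLine (p : String × List (String × String)) : String :=
  if pvRank p.1 < pvOrderNames.length ∧ pvEntryGetD p.2 "confidence" ≠ "" ∧ pvEntryGetD p.2 "last_updated" ≠ "" then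
    "  " ++ p.1 ++ ": " ++ pvSum p.2 ++ " [" ++ pvEntryGetD p.2 "confidence" ++ ", " ++ pvEntryGetD p.2 "last_updated" ++ "]"
  else
    "  " ++ p.1 ++ ": " ++ pvSum p.2

-- the line A's first loop emits for a present domain
def pvLineA (p : String × List (String × String)) : String :=
  "  " ++ p.1 ++ ": " ++ pvSum p.2 ++
    (if pvEntryGetD p.2 "confidence" ≠ "" ∧ pvEntryGetD p.2 "last_updated" ≠ "" then
       " [" ++ pvEntryGetD p.2 "confidence" ++ ", " ++ pvEntryGetD p.2 "last_updated" ++ "]"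
     else "")

def pvEmitB (r : Nat) (p : String × List (String × String)) : List String :=
  if pvSum p.2 ≠ "" ∧ pvRank p.1 = r then [pvLine p] else []

def pvEmitA (cs : PySem.Dict String (List (String × String))) (domain : String) : List String :=
  match cs.get? domain with
  | none => []
  | some entry => if pvSum entry ≠ "" then [pvLineA (domain, entry)] else []

def pvEmit2 (seen : PySem.Set String) (p : String × List (String × String)) : List String :=
  if p.1 ∈ seen then []
  else if pvSum p.2 ≠ "" then ["  " ++ p.1 ++ ": " ++ pvSum p.2] else []

lemma pvRank_eq (x : String) : pvRank x =
    if "PROGRAM" = x then 0 else if "SQUAT" = x then 1 else if "BENCH" = x then 2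
    else if "DEADLIFT" = x then 3 else if "OHP" = x then 4 else if "HEALTH" = x then 5
    else if "SCHEDULE" = x then 6 else if "LIFESTYLE" = x then 7 else if "GOALS" = x then 8
    else 9 := by
  unfold pvRank
  rw [show PySem.Dict.ofList pvOrderNames.zipIdx =
      PySem.Dict.mk [("PROGRAM",0),("SQUAT",1),("BENCH",2),("DEADLIFT",3),("OHP",4),
                     ("HEALTH",5),("SCHEDULE",6),("LIFESTYLE",7),("GOALS",8)] from rfl]
  rw [PySem.Dict.getD_eq_get?_getD]
  simp only [PySem.Dict.get?_mk_cons, beq_iff_eq]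
  split_ifs <;> rfl

lemma pvRank_le (x : String) : pvRank x ≤ 9 := by
  rw [pvRank_eq]; split_ifs <;> simp

lemma pvRank_lt_eq (x : String) (j : Nat) (hx : pvRank x = j) (hj : j < 9) :
    x = pvOrderNames.getD j "" := by
  rw [pvRank_eq] at hx
  split_ifs at hx with h1 h2 h3 h4 h5 h6 h7 h8 h9
  · subst hx; subst h1; rfl
  · subst hx; subst h2; rfl
  · subst hx; subst h3; rfl
  · subst hx; subst h4; rfl
  · subst hx; subst h5; rfl
  · subst hx; subst h6; rfl
  · subst hx; subst h7; rfl
  · subst hx; subst h8; rfl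
  · subst hx; subst h9; rfl
  · omega

lemma pvRank_eq_nine_iff (x : String) : pvRank x = 9 ↔ x ∉ pvOrderNames := by
  rw [pvRank_eq]
  split_ifs with h1 h2 h3 h4 h5 h6 h7 h8 h9
  · subst h1; decide
  · subst h2; decide
  · subst h3; decide
  · subst h4; decide
  · subst h5; decide
  · subst h6; decide
  · subst h7; decide
  · subst h8; decide
  · subst h9; decide
  · simp only [pvOrderNames, List.mem_cons, List.not_mem_nil, or_false]
    constructor
    · rintro _ (h|h|h|h|h|h|h|h|h) <;> simp_all
    · intro _; exact trivial

-- pvStepB (with B's actual rank dict and n) is, definitionally, the bucket update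
lemma pvStepB_eq (bs : List (List String)) (p : String × List (String × String)) :
    pvStepB (PySem.Dict.ofList pvOrderNames.zipIdx) pvOrderNames.length bs p =
      if pvSum p.2 = "" then bs
      else bs.set (pvRank p.1) (bs.getD (pvRank p.1) [] ++ [pvLine p]) := rfl

lemma pvStepB_length (bs : List (List String)) (p : String × List (String × String)) :
    (pvStepB (PySem.Dict.ofList pvOrderNames.zipIdx) pvOrderNames.length bs p).length = bs.length := by
  rw [pvStepB_eq]; split <;> simp

lemma pvGetD_set_eq (l : List (List String)) (i : Nat) (a : List String) (h : i < l.length) :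
    (l.set i a).getD i [] = a := by
  simp [List.getD_eq_getElem?_getD, h]

lemma pvGetD_set_ne (l : List (List String)) (i j : Nat) (a : List String) (h : i ≠ j) :
    (l.set i a).getD j [] = l.getD j [] := by
  simp [List.getD_eq_getElem?_getD, h]

lemma pvStepB_getD (bs : List (List String)) (hlen : bs.length = 10)
    (p : String × List (String × String)) (r : Nat) (hr : r < 10) :
    (pvStepB (PySem.Dict.ofList pvOrderNames.zipIdx) pvOrderNames.length bs p).getD r [] =
      bs.getD r [] ++ pvEmitB r p := by
  rw [pvStepB_eq]
  unfold pvEmitB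
  by_cases hs : pvSum p.2 = ""
  · simp [hs]
  · rw [if_neg hs]
    by_cases hr0 : pvRank p.1 = r
    · subst hr0
      rw [pvGetD_set_eq _ _ _ (by have := pvRank_le p.1; omega),
          if_pos ⟨hs, rfl⟩]
    · rw [pvGetD_set_ne _ _ _ _ hr0, if_neg (by tauto)]
      simp

lemma pvList_eq_map_range (bs : List (List String)) (h : bs.length = 10) :
    (List.range 10).map (fun r => bs.getD r []) = bs := by
  apply List.ext_getElem (by simp [h])
  intro i h1 h2
  simp [List.getD_eq_getElem?_getD, List.getElem?_eq_getElem h2]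

lemma pvBucketsEq :
    ∀ (l : List (String × List (String × String))) (bs : List (List String)), bs.length = 10 →
    l.foldl (pvStepB (PySem.Dict.ofList pvOrderNames.zipIdx) pvOrderNames.length) bs =
      (List.range 10).map (fun r => bs.getD r [] ++ l.flatMap (pvEmitB r)) := by
  intro l
  induction l with
  | nil =>
    intro bs h
    simp only [List.foldl_nil, List.flatMap_nil, List.append_nil]
    exact (pvList_eq_map_range bs h).symm
  | cons p t ih =>
    intro bs h
    rw [List.foldl_cons, ih _ (by rw [pvStepB_length]; exact h)]
    apply List.map_congr_left
    intro r hr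
    rw [pvStepB_getD bs h p r (List.mem_range.mp hr)]
    simp [List.append_assoc]

lemma pvLoopA1 (cs : PySem.Dict String (List (String × String))) :
    ∀ (order : List String) (ls : List String) (seen : PySem.Set String),
    (order.foldl (pvStepA1 cs) (ls, seen)).1 = ls ++ order.flatMap (pvEmitA cs) ∧
    (∀ x, x ∈ (order.foldl (pvStepA1 cs) (ls, seen)).2 ↔
      x ∈ seen ∨ (x ∈ order ∧ pvEmitA cs x ≠ [])) := by
  intro order
  induction order with
  | nil => intro ls seen; simp
  | cons d t ih =>
    intro ls seen
    rw [List.foldl_cons]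
    rcases hget : cs.get? d with _ | entry
    · have hstep : pvStepA1 cs (ls, seen) d = (ls, seen) := by simp [pvStepA1, hget]
      have hd : pvEmitA cs d = [] := by simp [pvEmitA, hget]
      rw [hstep]
      obtain ⟨ih1, ih2⟩ := ih ls seen
      refine ⟨by simp [ih1, hd], fun x => ?_⟩
      rw [ih2 x]
      simp only [List.mem_cons]
      constructor
      · rintro (h | ⟨h1, h2⟩)
        · exact Or.inl h
        · exact Or.inr ⟨Or.inr h1, h2⟩
      · rintro (h | ⟨rfl | h1, h2⟩)
        · exact Or.inl h
        · exact absurd hd h2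
        · exact Or.inr ⟨h1, h2⟩
    · by_cases hsum : pvSum entry = ""
      · have hstep : pvStepA1 cs (ls, seen) d = (ls, seen) := by
          have hsum' : ¬ PySem.Str.strip (pvEntryGetD entry "summary") ≠ "" := by
            simpa [pvSum] using hsum
          simp [pvStepA1, hget, hsum']
        have hd : pvEmitA cs d = [] := by simp [pvEmitA, hget, pvSum] at hsum ⊢; simp [hsum]
        rw [hstep]
        obtain ⟨ih1, ih2⟩ := ih ls seen
        refine ⟨by simp [ih1, hd], fun x => ?_⟩
        rw [ih2 x]
        simp only [List.mem_cons]
        constructor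
        · rintro (h | ⟨h1, h2⟩)
          · exact Or.inl h
          · exact Or.inr ⟨Or.inr h1, h2⟩
        · rintro (h | ⟨rfl | h1, h2⟩)
          · exact Or.inl h
          · exact absurd hd h2
          · exact Or.inr ⟨h1, h2⟩
      · have hsum' : PySem.Str.strip (pvEntryGetD entry "summary") ≠ "" := by
          simpa [pvSum] using hsum
        have hstep : pvStepA1 cs (ls, seen) d = (ls ++ [pvLineA (d, entry)], seen.add d) := by
          simp only [pvStepA1, hget]
          split_ifs with h
          · simp [pvLineA, pvSum, h]
          · simp [pvLineA, pvSum, h]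
        have hd : pvEmitA cs d = [pvLineA (d, entry)] := by simp [pvEmitA, hget, hsum]
        rw [hstep]
        obtain ⟨ih1, ih2⟩ := ih (ls ++ [pvLineA (d, entry)]) (seen.add d)
        have hne : pvEmitA cs d ≠ [] := by rw [hd]; simp
        refine ⟨by simp [ih1, hd, List.append_assoc], fun x => ?_⟩
        rw [ih2 x, PySem.Set.mem_add]
        simp only [List.mem_cons]
        constructor
        · rintro ((h | rfl) | ⟨h1, h2⟩)
          · exact Or.inl h
          · exact Or.inr ⟨Or.inl rfl, hne⟩
          · exact Or.inr ⟨Or.inr h1, h2⟩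
        · rintro (h | ⟨rfl | h1, h2⟩)
          · exact Or.inl (Or.inl h)
          · exact Or.inl (Or.inr rfl)
          · exact Or.inr ⟨h1, h2⟩

lemma pvLoopA2 (seen : PySem.Set String) :
    ∀ (l : List (String × List (String × String))) (ls : List String),
    l.foldl (pvStepA2 seen) ls = ls ++ l.flatMap (pvEmit2 seen) := by
  intro l
  induction l with
  | nil => simp
  | cons p t ih =>
    intro ls
    rw [List.foldl_cons, ih, List.flatMap_cons]
    have hstep : pvStepA2 seen ls p = ls ++ pvEmit2 seen p := by
      unfold pvStepA2 pvEmit2 pvSum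
      split_ifs <;> simp_all
    rw [hstep, List.append_assoc]

lemma pvFlatMapCongr {α β : Type} {l : List α} {f g : α → List β}
    (h : ∀ x ∈ l, f x = g x) : l.flatMap f = l.flatMap g := by
  induction l with
  | nil => rfl
  | cons a t ih =>
    rw [List.flatMap_cons, List.flatMap_cons, h a (by simp),
        ih (fun x hx => h x (by simp [hx]))]

lemma pvFlatMapKey {V : Type} (k : String) (g : String × V → List String)
    (hg : ∀ p : String × V, p.1 ≠ k → g p = []) :
    ∀ (l : List (String × V)), (l.map Prod.fst).Nodup →
    l.flatMap g = ((PySem.Dict.mk l).get? k).elim [] (fun v => g (k, v)) := by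
  intro l
  induction l with
  | nil => intro _; simp [PySem.Dict.get?]
  | cons a t ih =>
    intro hnd
    simp only [List.map_cons, List.nodup_cons] at hnd
    rw [List.flatMap_cons, PySem.Dict.get?_mk_cons]
    by_cases hk : a.1 = k
    · have ht : t.flatMap g = [] := by
        rw [List.flatMap_eq_nil_iff]
        intro p hp
        apply hg
        intro hpk
        exact hnd.1 (by rw [hk, ← hpk]; exact List.mem_map_of_mem hp)
      subst hk
      simp [ht]
    · rw [hg a hk, ih hnd.2]
      have : (a.1 == k) = false := by simpa using hk
      rw [this]
      simp

-- the line forms agree on known domains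
lemma pvLineA_eq (p : String × List (String × String)) (h : pvRank p.1 < 9) :
    pvLineA p = pvLine p := by
  unfold pvLineA pvLine
  have h' : pvRank p.1 < pvOrderNames.length := h
  simp only [h', true_and]
  split_ifs with hc
  · simp [String.append_assoc]
  · simp [String.append_empty]

-- for a known domain, bucket j collects exactly what A's first loop emits for it
lemma pvEmitB_known (cs : PySem.Dict String (List (String × String)))
    (hnd : (cs.items.map Prod.fst).Nodup)
    (k : String) (j : Nat) (hk : pvRank k = j) (hj : j < 9)
    (hkj : pvOrderNames.getD j "" = k) :
    cs.items.flatMap (pvEmitB j) = pvEmitA cs k := by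
  have hg : ∀ p : String × List (String × String), p.1 ≠ k → pvEmitB j p = [] := by
    intro p hp
    unfold pvEmitB
    rw [if_neg]
    rintro ⟨-, hr⟩
    exact hp ((pvRank_lt_eq p.1 j hr hj).trans hkj)
  rw [pvFlatMapKey k (pvEmitB j) hg cs.items hnd,
      show PySem.Dict.mk cs.items = cs from rfl]
  cases hv : cs.get? k with
  | none => simp [pvEmitA, hv]
  | some e =>
    have hlt : pvRank k < 9 := by omega
    simp only [pvEmitA, hv, Option.elim, pvEmitB, hk]
    by_cases hs : pvSum e = ""
    · simp [hs]
    · simp [hs, pvLineA_eq (k, e) hlt]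

-- the unknown-domain bucket collects exactly what A's second loop emits
lemma pvEmit2_eq (cs : PySem.Dict String (List (String × String)))
    (hnd : cs.keys.Nodup) (st2 : PySem.Set String)
    (hmem : ∀ x, x ∈ st2 ↔ x ∈ pvOrderNames ∧ pvEmitA cs x ≠ []) :
    cs.items.flatMap (pvEmit2 st2) = cs.items.flatMap (pvEmitB 9) := by
  apply pvFlatMapCongr
  intro p hp
  have hget : cs.get? p.1 = some p.2 := PySem.Dict.get?_of_mem_items cs hp hnd
  unfold pvEmit2 pvEmitB
  by_cases hs : pvSum p.2 = ""
  · simp [hs]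
  · have hne : pvEmitA cs p.1 ≠ [] := by simp [pvEmitA, hget, hs]
    by_cases hm : p.1 ∈ pvOrderNames
    · have hin : p.1 ∈ st2 := (hmem p.1).mpr ⟨hm, hne⟩
      have h9 : pvRank p.1 ≠ 9 := by
        rw [Ne, pvRank_eq_nine_iff]; simpa using hm
      simp [hin, hs, h9]
    · have hout : p.1 ∉ st2 := fun hx => hm ((hmem p.1).mp hx).1
      have h9 : pvRank p.1 = 9 := (pvRank_eq_nine_iff p.1).mpr hm
      have hlen : ¬ (9 < pvOrderNames.length) := by decide
      simp [hout, hs, h9, pvLine, hlen]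

lemma pvRepGetD (r : Nat) :
    (List.replicate (pvOrderNames.length + 1) ([] : List String)).getD r [] = [] := by
  simp only [List.getD_eq_getElem?_getD, List.getElem?_replicate]
  split <;> rfl

-- ===== VERDICT (by name: the statement is the Claim_ definition above) =====
theorem format_coach_state_py_spec : Claim_equal_format_coach_state_py := by
  intro coach_state _
  unfold Spec_format_coach_state_py format_coach_state_py format_coach_state_py_alt
  by_cases hemp : (PySem.Dict.ofList coach_state).items.isEmpty
  · rw [if_pos hemp]
    rw [List.isEmpty_iff] at hemp
    rw [hemp]
    rfl
  · rw [if_neg hemp]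
    dsimp only
    have hndk : (PySem.Dict.ofList coach_state).keys.Nodup :=
      PySem.Dict.nodup_keys_ofList coach_state
    have hnd : ((PySem.Dict.ofList coach_state).items.map Prod.fst).Nodup := by
      simpa [PySem.Dict.keys] using hndk
    obtain ⟨h1, h2⟩ :=
      pvLoopA1 (PySem.Dict.ofList coach_state) pvOrderNames [] (PySem.Set.ofList [])
    rw [pvLoopA2, h1, List.nil_append]
    rw [pvBucketsEq _ _ (by rfl)]
    congr 1
    have hmap : (List.range 10).map
        (fun r => (List.replicate (pvOrderNames.length + 1) ([] : List String)).getD r [] ++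
          (PySem.Dict.ofList coach_state).items.flatMap (pvEmitB r)) =
        (List.range 10).map
          (fun r => (PySem.Dict.ofList coach_state).items.flatMap (pvEmitB r)) := by
      apply List.map_congr_left
      intro r _
      rw [pvRepGetD, List.nil_append]
    rw [hmap]
    have hmem : ∀ x, x ∈ (pvOrderNames.foldl
        (pvStepA1 (PySem.Dict.ofList coach_state)) ([], PySem.Set.ofList [])).2 ↔
        x ∈ pvOrderNames ∧ pvEmitA (PySem.Dict.ofList coach_state) x ≠ [] := by
      intro x
      rw [h2 x]
      simp [show PySem.Set.ofList ([] : List String) = [] from rfl]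
    rw [pvEmit2_eq _ hndk _ hmem]
    have hrange : List.range 10 = [0,1,2,3,4,5,6,7,8,9] := rfl
    rw [hrange]
    have e0 := pvEmitB_known _ hnd "PROGRAM" 0 (by decide) (by omega) (by rfl)
    have e1 := pvEmitB_known _ hnd "SQUAT" 1 (by decide) (by omega) (by rfl)
    have e2 := pvEmitB_known _ hnd "BENCH" 2 (by decide) (by omega) (by rfl)
    have e3 := pvEmitB_known _ hnd "DEADLIFT" 3 (by decide) (by omega) (by rfl)
    have e4 := pvEmitB_known _ hnd "OHP" 4 (by decide) (by omega) (by rfl)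
    have e5 := pvEmitB_known _ hnd "HEALTH" 5 (by decide) (by omega) (by rfl)
    have e6 := pvEmitB_known _ hnd "SCHEDULE" 6 (by decide) (by omega) (by rfl)
    have e7 := pvEmitB_known _ hnd "LIFESTYLE" 7 (by decide) (by omega) (by rfl)
    have e8 := pvEmitB_known _ hnd "GOALS" 8 (by decide) (by omega) (by rfl)
    simp only [List.map_cons, List.map_nil, List.flatten_cons, List.flatten_nil,
      e0, e1, e2, e3, e4, e5, e6, e7, e8]
    simp [pvOrderNames, List.append_assoc]
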